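-- pv_equiv track=rewrite | github.com/behole/BOB-GEO | scripts/audit_heading_order.py | pick_sample
-- ===== SOURCE A (Python) =====
-- from collections import Counter, defaultdict
-- from typing import Dict, List, Optional, Tuple
--
-- def categorize(url: str) -> str:
--     if not url.startswith("http"):
--         return "other"
--     try:
--         path = url.split("/", 3)[3]
--     except Exception:
--         path = ""
--     path = "/" + path
--     if path in ("/", ""):
--         return "home"
--     if path.startswith("/products/"):
--         return "products"
--     if path.startswith("/collections/"):
--         return "collections"
--     if path.startswith("/blogs/"):
--         return "blogs"
--     if path.startswith("/pages/"):
--         return "pages"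
--     return "other"
--
-- def pick_sample(urls: List[str], max_pages: int) -> List[str]:
--     buckets: Dict[str, List[str]] = defaultdict(list)
--     for u in urls:
--         if not u.startswith("http"):
--             continue
--         if any(u.endswith(ext) for ext in (".xml", ".txt", ".jpg", ".png", ".webp", ".svg")):
--             continue
--         buckets[categorize(u)].append(u)
--     # ensure homepage first if present
--     sample: List[str] = []
--     for cat in ("home", "products", "collections", "blogs", "pages", "other"):
--         for u in buckets.get(cat, [])[: max(1, max_pages // 6)]:
--             sample.append(u)
--             if len(sample) >= max_pages:
--                 return sample
--     return sample
-- ===== SOURCE B (Python) =====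
-- def pick_sample(urls, max_pages):
--     def rank(u):
--         try:
--             tail = u.split("/", 3)[3]
--         except IndexError:
--             tail = ""
--         path = "/" + tail
--         if path == "/":
--             return 0
--         if path.startswith("/products/"):
--             return 1
--         if path.startswith("/collections/"):
--             return 2
--         if path.startswith("/blogs/"):
--             return 3
--         if path.startswith("/pages/"):
--             return 4
--         return 5
--
--     survivors = [u for u in urls
--                  if u.startswith("http")
--                  and not u.endswith((".xml", ".txt", ".jpg", ".png", ".webp", ".svg"))]
--     cap = max(1, max_pages // 6)
--     counts = {}
--     out = []
--     for u in sorted(survivors, key=rank):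
--         r = rank(u)
--         if counts.get(r, 0) < cap:
--             counts[r] = counts.get(r, 0) + 1
--             out.append(u)
--             if len(out) >= max_pages:
--                 return out
--     return out
-- ===== Notes on version B (the rewrite author's own statement) =====
-- stated objective: alternative
-- what changed: Replaces A's bucket-then-slice-each-category scheme (a defaultdict of per-category lists, then nested loops slicing each bucket) with a filter-tag-sort-stream scheme: filter survivors once, stably sort them by an integer category rank, and emit them in a single counter-driven pass with a per-rank cap and an early return at max_pages.
import Mathlib
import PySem

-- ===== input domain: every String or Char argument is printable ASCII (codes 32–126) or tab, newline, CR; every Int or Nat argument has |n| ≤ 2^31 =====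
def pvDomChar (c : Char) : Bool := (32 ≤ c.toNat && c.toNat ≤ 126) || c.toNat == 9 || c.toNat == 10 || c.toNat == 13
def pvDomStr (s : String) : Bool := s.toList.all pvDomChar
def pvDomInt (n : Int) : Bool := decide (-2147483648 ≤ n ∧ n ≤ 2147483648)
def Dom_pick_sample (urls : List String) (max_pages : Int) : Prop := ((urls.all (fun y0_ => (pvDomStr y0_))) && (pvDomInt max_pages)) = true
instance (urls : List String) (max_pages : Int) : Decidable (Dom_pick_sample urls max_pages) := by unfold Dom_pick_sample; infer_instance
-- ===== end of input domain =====

-- B replaces A's bucket-then-slice-each-category scheme with filter → stable sort by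
-- integer category rank → one counter-driven pass (alternative decomposition, same results).

-- ===== PORT A =====
def pvExtsA : List String := [".xml", ".txt", ".jpg", ".png", ".webp", ".svg"]

-- 'path = "/" + url.split("/", 3)[3]' with the try/except (only the indexing can raise) giving ""
def pvPathA (url : String) : String :=
  "/" ++ (match (PySem.Str.splitMax? url "/" 3).bind (fun ps => PySem.List.pyGet? ps 3) with
          | some p => p
          | none => "")

def pvCategorize (url : String) : String :=
  if !(PySem.Str.startswith url "http") then "other"
  else if pvPathA url = "/" ∨ pvPathA url = "" then "home"
  else if PySem.Str.startswith (pvPathA url) "/products/" then "products"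
  else if PySem.Str.startswith (pvPathA url) "/collections/" then "collections"
  else if PySem.Str.startswith (pvPathA url) "/blogs/" then "blogs"
  else if PySem.Str.startswith (pvPathA url) "/pages/" then "pages"
  else "other"

def pvBuildBuckets (urls : List String) : PySem.Dict String (List String) :=
  urls.foldl (fun d u =>
    if !(PySem.Str.startswith u "http") then d
    else if pvExtsA.any (fun ext => PySem.Str.endswith u ext) then d
    else d.insert (pvCategorize u) (d.getD (pvCategorize u) [] ++ [u]))
    PySem.Dict.empty

-- inner 'for u in bucket-slice' loop; .inl = the early 'return sample', .inr = fall through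
def pvInnerA (max_pages : Int) (sample : List String) : List String → Sum (List String) (List String)
  | [] => .inr sample
  | u :: rest =>
    if max_pages ≤ ((sample ++ [u]).length : Int) then .inl (sample ++ [u])
    else pvInnerA max_pages (sample ++ [u]) rest

def pvOuterA (buckets : PySem.Dict String (List String)) (max_pages : Int) (sample : List String) : List String → List String
  | [] => sample
  | cat :: cats =>
    match pvInnerA max_pages sample
        (PySem.List.slice (buckets.getD cat []) none (some (max 1 (PySem.Int.floordiv max_pages 6)))) with
    | .inl s => s
    | .inr s => pvOuterA buckets max_pages s cats

def pick_sample (urls : List String) (max_pages : Int) : List String :=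
  pvOuterA (pvBuildBuckets urls) max_pages [] ["home", "products", "collections", "blogs", "pages", "other"]

-- ===== PORT B =====
def pvExtsB : List String := [".xml", ".txt", ".jpg", ".png", ".webp", ".svg"]

-- '"/" + tail' where tail = u.split("/", 3)[3], or "" if that indexing raises
def pvPathB (u : String) : String :=
  "/" ++ (match (PySem.Str.splitMax? u "/" 3).bind (fun ps => PySem.List.pyGet? ps 3) with
          | some p => p
          | none => "")

def pvRank (u : String) : Int :=
  if pvPathB u = "/" then 0
  else if PySem.Str.startswith (pvPathB u) "/products/" then 1
  else if PySem.Str.startswith (pvPathB u) "/collections/" then 2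
  else if PySem.Str.startswith (pvPathB u) "/blogs/" then 3
  else if PySem.Str.startswith (pvPathB u) "/pages/" then 4
  else 5

-- 'u.endswith((...))' with a tuple argument is ported as an 'any' over the tuple's members
def pvSurvivors (urls : List String) : List String :=
  urls.filter (fun u =>
    PySem.Str.startswith u "http" && !(pvExtsB.any (fun ext => PySem.Str.endswith u ext)))

def pvAltLoop (cap max_pages : Int) (counts : PySem.Dict Int Int) (out : List String) : List String → List String
  | [] => out
  | u :: rest =>
    if counts.getD (pvRank u) 0 < cap then
      if max_pages ≤ ((out ++ [u]).length : Int) then out ++ [u]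
      else pvAltLoop cap max_pages (counts.insert (pvRank u) (counts.getD (pvRank u) 0 + 1)) (out ++ [u]) rest
    else pvAltLoop cap max_pages counts out rest

def pick_sample_alt (urls : List String) (max_pages : Int) : List String :=
  pvAltLoop (max 1 (PySem.Int.floordiv max_pages 6)) max_pages PySem.Dict.empty []
    (PySem.List.sorted (pvSurvivors urls) pvRank)

-- ===== PRECONDITION & SPEC =====
def Spec_pick_sample (urls : List String) (max_pages : Int) (out : List String) : Prop := out = pick_sample_alt urls max_pages
instance (urls : List String) (max_pages : Int) (out : List String) : Decidable (Spec_pick_sample urls max_pages out) := by unfold Spec_pick_sample; infer_instance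

-- ===== CLAIM (what is proved, stated in full; the proofs are below) =====
def Claim_equal_pick_sample : Prop := ∀ (urls : List String) (max_pages : Int), Dom_pick_sample urls max_pages → Spec_pick_sample urls max_pages (pick_sample urls max_pages)

-- ===== LEMMAS AND PROOFS =====

-- the elements of xs whose rank is i, in order
def pvF (xs : List String) (i : Int) : List String := xs.filter (fun u => decide (pvRank u = i))

-- concatenation of the rank-classes of xs along a list of ranks
def pvSegs (xs : List String) (rs : List Int) : List String := rs.flatMap (fun r => pvF xs r)

def pvCatName (r : Int) : String :=
  if r = 0 then "home" else if r = 1 then "products" else if r = 2 then "collections"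
  else if r = 3 then "blogs" else if r = 4 then "pages" else "other"

lemma pvRank_mem (u : String) : pvRank u ∈ ([0, 1, 2, 3, 4, 5] : List Int) := by
  unfold pvRank
  split_ifs <;> simp

lemma pvPathA_ne_empty (u : String) : pvPathA u ≠ "" := by
  intro h
  have h2 := congrArg String.toList h
  simp [pvPathA, String.toList_append] at h2

lemma pvCategorize_eq (u : String) (h : PySem.Str.startswith u "http" = true) :
    pvCategorize u = pvCatName (pvRank u) := by
  have hBA : pvPathB u = pvPathA u := rfl
  have hne := pvPathA_ne_empty u
  unfold pvCategorize pvRank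
  rw [hBA, h]
  simp only [Bool.not_true, Bool.false_eq_true, if_false]
  split_ifs with h1 h2 h3 h4 h5 h6 <;> simp_all [pvCatName]

-- ----- stable sort = concatenation of rank classes -----

lemma pvInsertBy_skip {α : Type} (p : α → α → Bool) (x : α) (ys zs : List α)
    (h : ∀ y ∈ ys, p x y = false) :
    PySem.List.insertBy p x (ys ++ zs) = ys ++ PySem.List.insertBy p x zs := by
  induction ys with
  | nil => simp
  | cons y ys ih =>
    simp only [List.cons_append, PySem.List.insertBy, h y (by simp)]
    simp [ih (fun y hy => h y (by simp [hy]))]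

lemma pvInsertBy_front {α : Type} (p : α → α → Bool) (x : α) (zs : List α)
    (h : ∀ z ∈ zs, p x z = true) :
    PySem.List.insertBy p x zs = x :: zs := by
  cases zs with
  | nil => simp [PySem.List.insertBy]
  | cons z zs => simp [PySem.List.insertBy, h z (by simp)]

lemma pvF_append_sing (ps : List String) (x : String) (r : Int) :
    pvF (ps ++ [x]) r = pvF ps r ++ (if pvRank x = r then [x] else []) := by
  simp [pvF, List.filter_append]
  split_ifs <;> simp_all

lemma pvSegs_append_notmem (ps : List String) (x : String) (rs : List Int)
    (h : pvRank x ∉ rs) :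
    pvSegs (ps ++ [x]) rs = pvSegs ps rs := by
  induction rs with
  | nil => simp [pvSegs]
  | cons r rs ih =>
    simp only [pvSegs, List.flatMap_cons] at *
    rw [pvF_append_sing, if_neg (by intro he; exact h (by simp [he]))]
    simp [ih (by intro hm; exact h (by simp [hm]))]

lemma pvInsertBy_segs (x : String) (ps : List String) (rs : List Int)
    (hmem : pvRank x ∈ rs) (hs : rs.Pairwise (· < ·)) :
    PySem.List.insertBy (fun a b => decide (pvRank a < pvRank b)) x (pvSegs ps rs)
      = pvSegs (ps ++ [x]) rs := by
  induction rs with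
  | nil => simp at hmem
  | cons r rs ih =>
    simp only [pvSegs, List.flatMap_cons] at *
    by_cases he : pvRank x = r
    · rw [pvInsertBy_skip _ _ _ _ (by
        intro y hy
        simp only [pvF, List.mem_filter, decide_eq_true_eq] at hy
        simp [hy.2, he])]
      rw [pvInsertBy_front _ _ _ (by
        intro z hz
        simp only [List.mem_flatMap, pvF, List.mem_filter, decide_eq_true_eq] at hz
        obtain ⟨r', hr', _, hrk⟩ := hz
        have : r < r' := (List.pairwise_cons.1 hs).1 r' hr'
        simp [hrk, he]; omega)]
      rw [pvF_append_sing, if_pos he]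
      have hrest := pvSegs_append_notmem ps x rs (by
        intro hm
        have : r < pvRank x := (List.pairwise_cons.1 hs).1 _ hm
        omega)
      simp only [pvSegs] at hrest
      rw [hrest]
      simp
    · have hmem' : pvRank x ∈ rs := by
        rcases List.mem_cons.1 hmem with h1 | h1
        · exact absurd h1 he
        · exact h1
      have hlt : r < pvRank x := (List.pairwise_cons.1 hs).1 _ hmem'
      rw [pvInsertBy_skip _ _ _ _ (by
        intro y hy
        simp only [pvF, List.mem_filter, decide_eq_true_eq] at hy
        simp [hy.2]; omega)]
      rw [ih hmem' (List.pairwise_cons.1 hs).2]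
      rw [pvF_append_sing, if_neg he]
      simp

lemma pvSorted_eq_segs (xs : List String) :
    PySem.List.sorted xs pvRank = pvSegs xs [0, 1, 2, 3, 4, 5] := by
  rw [PySem.List.sorted_eq_foldl_insertBy]
  have key : ∀ (ys ps : List String),
      List.foldl (fun acc x => PySem.List.insertBy (fun a b => decide (pvRank a < pvRank b)) x acc)
        (pvSegs ps [0, 1, 2, 3, 4, 5]) ys = pvSegs (ps ++ ys) [0, 1, 2, 3, 4, 5] := by
    intro ys
    induction ys with
    | nil => simp
    | cons y ys ih =>
      intro ps
      rw [List.foldl_cons, pvInsertBy_segs y ps _ (pvRank_mem y) (by decide)]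
      rw [ih (ps ++ [y])]
      simp
  have h0 := key xs []
  simpa [pvSegs, pvF] using h0

-- ----- buckets = rank classes of the survivors -----

lemma pvBuckets_getD (urls : List String) (c : String) :
    (pvBuildBuckets urls).getD c [] = (pvSurvivors urls).filter (fun u => decide (pvCategorize u = c)) := by
  have key : ∀ (us : List String) (d : PySem.Dict String (List String)),
      (us.foldl (fun d u =>
        if !(PySem.Str.startswith u "http") then d
        else if pvExtsA.any (fun ext => PySem.Str.endswith u ext) then d
        else d.insert (pvCategorize u) (d.getD (pvCategorize u) [] ++ [u])) d).getD c []
      = d.getD c [] ++ ((us.filter (fun u =>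
          PySem.Str.startswith u "http" && !(pvExtsB.any (fun ext => PySem.Str.endswith u ext)))).filter
            (fun u => decide (pvCategorize u = c))) := by
    intro us
    induction us with
    | nil => simp
    | cons u us ih =>
      intro d
      simp only [List.foldl_cons, List.filter_cons]
      by_cases h1 : PySem.Str.startswith u "http" = true
      · by_cases h2 : (pvExtsA.any fun ext => PySem.Str.endswith u ext) = true
        · have h2' : (pvExtsB.any fun ext => PySem.Str.endswith u ext) = true := h2
          simp only [h1, h2, h2', Bool.not_true, Bool.false_eq_true, if_false,
            if_true, Bool.and_false]
          exact ih d
        · have h2a : (pvExtsA.any fun ext => PySem.Str.endswith u ext) = false :=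
            Bool.eq_false_iff.mpr h2
          have h2b : (pvExtsB.any fun ext => PySem.Str.endswith u ext) = false := h2a
          simp only [h1, h2a, h2b, Bool.not_true, Bool.false_eq_true, if_false,
            Bool.not_false, Bool.and_true, if_true]
          rw [ih, PySem.Dict.getD_insert]
          by_cases h3 : pvCategorize u = c
          · rw [if_pos h3.symm, List.filter_cons, if_pos (by simp [h3]), h3]
            simp
          · rw [if_neg (fun he => h3 he.symm), List.filter_cons, if_neg (by simp [h3])]
      · have h1' : PySem.Str.startswith u "http" = false := Bool.eq_false_iff.mpr h1
        simp only [h1', Bool.not_false, if_true, Bool.false_and, Bool.false_eq_true, if_false]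
        exact ih d
  unfold pvBuildBuckets pvSurvivors
  rw [key urls PySem.Dict.empty]
  simp

lemma pvBucket_eq_pvF (urls : List String) (r : Int) (hr : r ∈ ([0, 1, 2, 3, 4, 5] : List Int)) :
    (pvBuildBuckets urls).getD (pvCatName r) [] = pvF (pvSurvivors urls) r := by
  rw [pvBuckets_getD]
  unfold pvF
  apply List.filter_congr
  intro u hu
  have hstart : PySem.Str.startswith u "http" = true := by
    unfold pvSurvivors at hu
    have hx := (List.mem_filter.1 hu).2
    rw [Bool.and_eq_true] at hx
    exact hx.1
  rw [pvCategorize_eq u hstart]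
  have hmem := pvRank_mem u
  simp only [List.mem_cons, List.not_mem_nil, or_false] at hr hmem
  rcases hr with rfl | rfl | rfl | rfl | rfl | rfl <;>
    rcases hmem with h | h | h | h | h | h <;> simp_all [pvCatName]

-- ----- the two loops -----

lemma pvAltLoop_congr (cap mp : Int) :
    ∀ (us : List String) (c1 c2 : PySem.Dict Int Int) (out : List String),
      (∀ u ∈ us, c1.getD (pvRank u) 0 = c2.getD (pvRank u) 0) →
      pvAltLoop cap mp c1 out us = pvAltLoop cap mp c2 out us := by
  intro us
  induction us with
  | nil => intro c1 c2 out h; rfl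
  | cons u us ih =>
    intro c1 c2 out h
    have hu := h u (by simp)
    simp only [pvAltLoop]
    rw [hu]
    by_cases hlt : c2.getD (pvRank u) 0 < cap
    · simp only [if_pos hlt]
      split_ifs with hm
      · rfl
      · exact ih _ _ _ (by
          intro u' hu'
          rw [PySem.Dict.getD_insert, PySem.Dict.getD_insert]
          split_ifs with he
          · rfl
          · exact h u' (by simp [hu']))
    · simp only [if_neg hlt]
      exact ih _ _ _ (fun u' hu' => h u' (by simp [hu']))

lemma pvSegmentSim (cap mp i : Int) :
    ∀ (us : List String) (counts : PySem.Dict Int Int) (out : List String) (c : Int),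
      (∀ u ∈ us, pvRank u = i) → counts.getD i 0 = c → 0 ≤ c →
      ∃ counts' : PySem.Dict Int Int,
        (∀ j : Int, j ≠ i → counts'.getD j 0 = counts.getD j 0) ∧
        ∀ rest : List String,
          pvAltLoop cap mp counts out (us ++ rest) =
            match pvInnerA mp out (us.take (cap - c).toNat) with
            | .inl s => s
            | .inr s => pvAltLoop cap mp counts' s rest := by
  intro us
  induction us with
  | nil =>
    intro counts out c hr hc hc0
    refine ⟨counts, fun j _ => rfl, fun rest => ?_⟩
    simp [pvInnerA]
  | cons u tl ih =>
    intro counts out c hr hc hc0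
    have hru : pvRank u = i := hr u (by simp)
    by_cases hlt : c < cap
    · have htake : (cap - c).toNat = (cap - (c + 1)).toNat + 1 := by omega
      by_cases hret : mp ≤ ((out ++ [u]).length : Int)
      · refine ⟨counts.insert i (c + 1), fun j hj => by
          rw [PySem.Dict.getD_insert]; simp [hj], fun rest => ?_⟩
        simp only [List.cons_append, pvAltLoop, hru, hc, if_pos hlt, if_pos hret]
        rw [htake]
        simp only [List.take_succ_cons, pvInnerA, if_pos hret]
      · obtain ⟨counts', hprop, heq⟩ := ih (counts.insert i (c + 1)) (out ++ [u]) (c + 1)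
          (fun u' hu' => hr u' (by simp [hu']))
          (by rw [PySem.Dict.getD_insert]; simp) (by omega)
        refine ⟨counts', fun j hj => by
          rw [hprop j hj, PySem.Dict.getD_insert]; simp [hj], fun rest => ?_⟩
        simp only [List.cons_append, pvAltLoop, hru, hc, if_pos hlt, if_neg hret]
        rw [heq rest, htake]
        simp only [List.take_succ_cons, pvInnerA, if_neg hret]
    · have htake : (cap - c).toNat = 0 := by omega
      obtain ⟨counts', hprop, heq⟩ := ih counts out c
        (fun u' hu' => hr u' (by simp [hu'])) hc hc0
      refine ⟨counts', hprop, fun rest => ?_⟩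
      simp only [List.cons_append, pvAltLoop, hru, hc, if_neg hlt]
      rw [heq rest, htake]
      simp [pvInnerA]

lemma pvChain (urls : List String) (mp : Int) :
    ∀ (cats : List (String × Int)) (out : List String),
      cats.Pairwise (fun a b => a.2 ≠ b.2) →
      (∀ p ∈ cats, (pvBuildBuckets urls).getD p.1 [] = pvF (pvSurvivors urls) p.2) →
      pvOuterA (pvBuildBuckets urls) mp out (cats.map Prod.fst) =
        pvAltLoop (max 1 (PySem.Int.floordiv mp 6)) mp PySem.Dict.empty out
          (cats.flatMap (fun p => pvF (pvSurvivors urls) p.2)) := by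
  intro cats
  induction cats with
  | nil => intro out _ _; rfl
  | cons p cats ih =>
    intro out hpw hb
    simp only [List.map_cons, List.flatMap_cons]
    obtain ⟨cs', hprop, heq⟩ := pvSegmentSim (max 1 (PySem.Int.floordiv mp 6)) mp p.2
      (pvF (pvSurvivors urls) p.2) PySem.Dict.empty out 0
      (fun u hu => of_decide_eq_true (List.mem_filter.1 hu).2)
      (by simp) le_rfl
    rw [heq (cats.flatMap (fun p => pvF (pvSurvivors urls) p.2))]
    simp only [pvOuterA]
    rw [hb p (by simp), PySem.List.slice_to _ (by omega : (0:Int) ≤ max 1 (PySem.Int.floordiv mp 6))]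
    rw [show ((max 1 (PySem.Int.floordiv mp 6)) - 0 : Int) = max 1 (PySem.Int.floordiv mp 6) by ring]
    cases hres : pvInnerA mp out ((pvF (pvSurvivors urls) p.2).take (max 1 (PySem.Int.floordiv mp 6)).toNat) with
    | inl s => rfl
    | inr s =>
      dsimp only
      rw [ih s (List.pairwise_cons.1 hpw).2 (fun q hq => hb q (by simp [hq]))]
      refine pvAltLoop_congr _ _ _ PySem.Dict.empty cs' s ?_
      intro u hu
      obtain ⟨q, hq, hu2⟩ := List.mem_flatMap.1 hu
      have hrk : pvRank u = q.2 := of_decide_eq_true (List.mem_filter.1 hu2).2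
      have hne : q.2 ≠ p.2 := ((List.pairwise_cons.1 hpw).1 q hq).symm
      rw [hrk]
      exact (hprop q.2 hne).symm

-- ===== VERDICT (by name: the statement is the Claim_ definition above) =====
theorem pick_sample_spec : Claim_equal_pick_sample := by
  intro urls mp _
  unfold Spec_pick_sample pick_sample pick_sample_alt
  rw [pvSorted_eq_segs]
  have h := pvChain urls mp
    [("home", 0), ("products", 1), ("collections", 2), ("blogs", 3), ("pages", 4), ("other", 5)]
    [] (by decide)
    (by
      intro p hp
      simp only [List.mem_cons, List.not_mem_nil, or_false] at hp
      rcases hp with rfl | rfl | rfl | rfl | rfl | rfl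
      · exact pvBucket_eq_pvF urls 0 (by decide)
      · exact pvBucket_eq_pvF urls 1 (by decide)
      · exact pvBucket_eq_pvF urls 2 (by decide)
      · exact pvBucket_eq_pvF urls 3 (by decide)
      · exact pvBucket_eq_pvF urls 4 (by decide)
      · exact pvBucket_eq_pvF urls 5 (by decide))
  simpa [pvSegs] using h
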